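-- pv_equiv track=rewrite | github.com/chrislemarquand/Ledger | scripts/generate_status_messaging_audit.py | classify_trigger
-- ===== SOURCE A (Python) =====
-- def classify_trigger(file: str, symbol: str, template: str) -> str:
--     low = f"{file} {symbol} {template}".lower()
--     if "runmodal" in low or "alert" in low:
--         return "User decision prompt"
--     if "import" in low:
--         return "Import flow"
--     if any(k in low for k in ["apply", "restore"]):
--         return "Apply/restore flow"
--     if "preset" in low:
--         return "Preset flow"
--     if any(k in low for k in ["open", "finder", "reveal", "sidebar"]):
--         return "Navigation action"
--     if any(k in low for k in ["quit", "launch", "exiftool"]):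
--         return "App lifecycle"
--     return "UI action"
-- ===== SOURCE B (Python) =====
-- LABELS = [
--     "User decision prompt",
--     "Import flow",
--     "Apply/restore flow",
--     "Preset flow",
--     "Navigation action",
--     "App lifecycle",
--     "UI action",
-- ]
--
-- PRIORITY = {
--     "runmodal": 0, "alert": 0,
--     "import": 1,
--     "apply": 2, "restore": 2,
--     "preset": 3,
--     "open": 4, "finder": 4, "reveal": 4, "sidebar": 4,
--     "quit": 5, "launch": 5, "exiftool": 5,
-- }
--
-- def classify_trigger(file: str, symbol: str, template: str) -> str:
--     # One left-to-right sweep over the lowered text: at each position, take the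
--     # best (lowest) priority of any keyword starting there; index a label table.
--     low = f"{file} {symbol} {template}".lower()
--     best = 6
--     for i in range(len(low)):
--         for kw, p in PRIORITY.items():
--             if p < best and low.startswith(kw, i):
--                 best = p
--     return LABELS[best]
-- ===== Notes on version B (the rewrite author's own statement) =====
-- stated objective: alternative
-- what changed: A asks per keyword group, in priority order, whether the keyword occurs anywhere (one substring search per keyword); B makes a single left-to-right sweep over the lowered text, at each position taking the minimum priority of any keyword starting there, and finally indexes a label table with that minimum.
import Mathlib
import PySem

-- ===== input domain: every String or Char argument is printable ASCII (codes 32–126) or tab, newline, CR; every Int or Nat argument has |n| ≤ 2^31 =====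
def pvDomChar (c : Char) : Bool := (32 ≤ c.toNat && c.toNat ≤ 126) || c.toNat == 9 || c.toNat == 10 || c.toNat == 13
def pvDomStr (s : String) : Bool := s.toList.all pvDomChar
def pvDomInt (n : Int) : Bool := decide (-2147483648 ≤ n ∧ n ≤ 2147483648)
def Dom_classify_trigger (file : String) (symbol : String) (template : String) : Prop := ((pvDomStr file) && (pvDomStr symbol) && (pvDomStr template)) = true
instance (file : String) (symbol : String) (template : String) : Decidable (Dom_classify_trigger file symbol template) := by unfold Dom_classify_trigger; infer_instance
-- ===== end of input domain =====

-- B replaces A's per-keyword substring if-ladder by a single left-to-right sweep of the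
-- lowered text that accumulates the minimum priority of any keyword starting at each
-- position, then indexes a label table (alternative algorithm; same cost class).

-- ===== PORT A =====
def classify_trigger (file : String) (symbol : String) (template : String) : String :=
  let low := PySem.Str.lower (file ++ " " ++ symbol ++ " " ++ template)
  if PySem.Str.isIn "runmodal" low || PySem.Str.isIn "alert" low then "User decision prompt"
  else if PySem.Str.isIn "import" low then "Import flow"
  else if (["apply", "restore"].any fun k => PySem.Str.isIn k low) then "Apply/restore flow"
  else if PySem.Str.isIn "preset" low then "Preset flow"
  else if (["open", "finder", "reveal", "sidebar"].any fun k => PySem.Str.isIn k low) then "Navigation action"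
  else if (["quit", "launch", "exiftool"].any fun k => PySem.Str.isIn k low) then "App lifecycle"
  else "UI action"

-- ===== PORT B =====
def pvLabels : List String :=
  ["User decision prompt", "Import flow", "Apply/restore flow", "Preset flow",
   "Navigation action", "App lifecycle", "UI action"]

def pvPriority : List (List Char × Nat) :=
  [("runmodal".toList, 0), ("alert".toList, 0),
   ("import".toList, 1),
   ("apply".toList, 2), ("restore".toList, 2),
   ("preset".toList, 3),
   ("open".toList, 4), ("finder".toList, 4), ("reveal".toList, 4), ("sidebar".toList, 4),
   ("quit".toList, 5), ("launch".toList, 5), ("exiftool".toList, 5)]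

-- inner loop of Source B: fold the keyword table at one position
-- (low.startswith(kw, i) is ported by hand, exactly, as kw prefix of the drop-i suffix)
def pvScanPos (lowL : List Char) (b : Nat) (i : Nat) : Nat :=
  pvPriority.foldl (fun b2 kp => if kp.2 < b2 && kp.1.isPrefixOf (lowL.drop i) then kp.2 else b2) b

-- outer loop of Source B: sweep every position, starting from best = 6
def pvBest (lowL : List Char) : Nat :=
  (List.range lowL.length).foldl (pvScanPos lowL) 6

def classify_trigger_alt (file : String) (symbol : String) (template : String) : String :=
  let low := PySem.Str.lower (file ++ " " ++ symbol ++ " " ++ template)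
  pvLabels.getD (pvBest low.toList) ""

-- ===== PRECONDITION & SPEC =====
def Spec_classify_trigger (file : String) (symbol : String) (template : String) (out : String) : Prop := out = classify_trigger_alt file symbol template
instance (file : String) (symbol : String) (template : String) (out : String) : Decidable (Spec_classify_trigger file symbol template out) := by unfold Spec_classify_trigger; infer_instance

-- ===== CLAIM (what is proved, stated in full; the proofs are below) =====
def Claim_equal_classify_trigger : Prop := ∀ (file : String) (symbol : String) (template : String), Dom_classify_trigger file symbol template → Spec_classify_trigger file symbol template (classify_trigger file symbol template)

-- ===== LEMMAS AND PROOFS =====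

set_option maxHeartbeats 4000000

-- one inner-loop step never increases the accumulator
theorem pv_step_le (t : List Char) (b2 : Nat) (kp : List Char × Nat) :
    (if kp.2 < b2 && kp.1.isPrefixOf t then kp.2 else b2) ≤ b2 := by
  split
  · next hm =>
      simp only [Bool.and_eq_true, decide_eq_true_eq] at hm
      omega
  · exact Nat.le_refl b2

-- the fold accumulator never increases
theorem pv_foldl_le {α : Type} (f : Nat → α → Nat) (h : ∀ b x, f b x ≤ b) :
    ∀ (l : List α) (b : Nat), l.foldl f b ≤ b := by
  intro l
  induction l with
  | nil => intro b; exact Nat.le_refl b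
  | cons x xs ih => intro b; exact Nat.le_trans (ih (f b x)) (h b x)

-- if some element forces the accumulator below c, the whole fold ends below c
theorem pv_foldl_le_of_mem {α : Type} (f : Nat → α → Nat) (h : ∀ b x, f b x ≤ b)
    {x : α} {l : List α} (hx : x ∈ l) (c : Nat) (hc : ∀ b, f b x ≤ c) (b : Nat) :
    l.foldl f b ≤ c := by
  obtain ⟨s, t, rfl⟩ := List.append_of_mem hx
  rw [List.foldl_append, List.foldl_cons]
  exact Nat.le_trans (pv_foldl_le f h t _) (hc _)

-- an invariant preserved by each step is preserved by the fold
theorem pv_foldl_inv {α : Type} (S : Nat → Prop) (f : Nat → α → Nat) :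
    ∀ (l : List α), (∀ b x, x ∈ l → S b → S (f b x)) → ∀ b, S b → S (l.foldl f b) := by
  intro l
  induction l with
  | nil => intro _ b hb; exact hb
  | cons x xs ih =>
      intro h b hb
      exact ih (fun b y hy => h b y (List.mem_cons_of_mem x hy))
        (f b x) (h b x (List.mem_cons_self ..) hb)

theorem pvScanPos_le (lowL : List Char) (b i : Nat) : pvScanPos lowL b i ≤ b :=
  pv_foldl_le _ (fun b2 kp => pv_step_le (lowL.drop i) b2 kp) pvPriority b

theorem pvScanPos_hit (lowL : List Char) (i : Nat) (kw : List Char) (p : Nat)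
    (hmem : (kw, p) ∈ pvPriority) (hpre : kw <+: lowL.drop i) (b : Nat) :
    pvScanPos lowL b i ≤ p := by
  unfold pvScanPos
  refine pv_foldl_le_of_mem _ (fun b2 kp => pv_step_le (lowL.drop i) b2 kp) hmem p
    (fun b2 => ?_) b
  have hp' : kw.isPrefixOf (lowL.drop i) = true := List.isPrefixOf_iff_prefix.2 hpre
  show (if p < b2 && kw.isPrefixOf (lowL.drop i) then p else b2) ≤ p
  rw [hp', Bool.and_true]
  split
  · exact Nat.le_refl p
  · next hm => simp only [decide_eq_true_eq] at hm; omega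

theorem pvBest_le (lowL : List Char) (kw : List Char) (p : Nat)
    (hmem : (kw, p) ∈ pvPriority) (hne : kw ≠ [])
    (hin : PySem.Chars.isIn kw lowL = true) : pvBest lowL ≤ p := by
  obtain ⟨j, hj⟩ := (PySem.Chars.exists_prefix_drop_iff_isIn (sub := kw) (s := lowL)).2 hin
  have hjlt : j < lowL.length := by
    by_contra h
    have hd : lowL.drop j = [] := List.drop_eq_nil_iff.2 (Nat.le_of_not_lt h)
    rw [hd] at hj
    exact hne (List.prefix_nil.1 hj)
  unfold pvBest
  exact pv_foldl_le_of_mem _ (fun b i => pvScanPos_le lowL b i)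
    (List.mem_range.2 hjlt) p (fun b => pvScanPos_hit lowL j kw p hmem hj b) 6

theorem pvBest_inv (lowL : List Char) :
    pvBest lowL = 6 ∨ ∃ kp ∈ pvPriority, kp.2 = pvBest lowL ∧ PySem.Chars.isIn kp.1 lowL = true := by
  unfold pvBest
  apply pv_foldl_inv
    (fun b => b = 6 ∨ ∃ kp ∈ pvPriority, kp.2 = b ∧ PySem.Chars.isIn kp.1 lowL = true)
  · intro b i _ hb
    unfold pvScanPos
    apply pv_foldl_inv
      (fun b => b = 6 ∨ ∃ kp ∈ pvPriority, kp.2 = b ∧ PySem.Chars.isIn kp.1 lowL = true)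
    · intro b2 kp hkp hb2
      split
      · next hm =>
          right
          refine ⟨kp, hkp, rfl, ?_⟩
          have hpre : kp.1 <+: lowL.drop i :=
            List.isPrefixOf_iff_prefix.1 ((Bool.and_eq_true _ _).mp hm).2
          rw [PySem.Chars.isIn_iff_infix]
          exact hpre.isInfix.trans (List.drop_suffix i lowL).isInfix
      · exact hb2
    · exact hb
  · exact Or.inl rfl

theorem pvBest_ge (lowL : List Char) (k : Nat) (hk : k ≤ 6)
    (habsent : ∀ kw p, (kw, p) ∈ pvPriority → p < k → PySem.Chars.isIn kw lowL = false) :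
    k ≤ pvBest lowL := by
  rcases pvBest_inv lowL with h | ⟨kp, hmem, hp, hin⟩
  · omega
  · by_contra h
    have hlt : kp.2 < k := by omega
    have := habsent kp.1 kp.2 hmem hlt
    rw [hin] at this
    exact Bool.true_eq_false.mp this

-- the B sweep computed on the shared lowered text equals A's if-ladder
theorem pv_main (lowL : List Char) :
    (if PySem.Chars.isIn "runmodal".toList lowL || PySem.Chars.isIn "alert".toList lowL then "User decision prompt"
     else if PySem.Chars.isIn "import".toList lowL then "Import flow"
     else if PySem.Chars.isIn "apply".toList lowL || PySem.Chars.isIn "restore".toList lowL then "Apply/restore flow"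
     else if PySem.Chars.isIn "preset".toList lowL then "Preset flow"
     else if PySem.Chars.isIn "open".toList lowL || (PySem.Chars.isIn "finder".toList lowL || (PySem.Chars.isIn "reveal".toList lowL || PySem.Chars.isIn "sidebar".toList lowL)) then "Navigation action"
     else if PySem.Chars.isIn "quit".toList lowL || (PySem.Chars.isIn "launch".toList lowL || PySem.Chars.isIn "exiftool".toList lowL) then "App lifecycle"
     else "UI action") = pvLabels.getD (pvBest lowL) "" := by
  split_ifs with h1 h2 h3 h4 h5 h6
  all_goals simp only [Bool.or_eq_true, not_or, Bool.not_eq_true] at h1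
  all_goals try simp only [Bool.or_eq_true, not_or, Bool.not_eq_true] at h2
  all_goals try simp only [Bool.or_eq_true, not_or, Bool.not_eq_true] at h3
  all_goals try simp only [Bool.or_eq_true, not_or, Bool.not_eq_true] at h4
  all_goals try simp only [Bool.or_eq_true, not_or, Bool.not_eq_true] at h5
  all_goals try simp only [Bool.or_eq_true, not_or, Bool.not_eq_true] at h6
  · have hb : pvBest lowL = 0 := by
      rcases h1 with h | h
      · exact Nat.le_zero.mp (pvBest_le lowL _ 0 (by simp [pvPriority]) (by simp) h)
      · exact Nat.le_zero.mp (pvBest_le lowL _ 0 (by simp [pvPriority]) (by simp) h)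
    rw [hb]; rfl
  · have hle : pvBest lowL ≤ 1 := pvBest_le lowL _ 1 (by simp [pvPriority]) (by simp) h2
    have hge : 1 ≤ pvBest lowL := by
      refine pvBest_ge lowL 1 (by omega) ?_
      intro kw p hmem hlt
      simp only [pvPriority, List.mem_cons, List.not_mem_nil, or_false, Prod.mk.injEq] at hmem
      rcases hmem with ⟨rfl, rfl⟩ | ⟨rfl, rfl⟩ | ⟨rfl, rfl⟩ | ⟨rfl, rfl⟩ | ⟨rfl, rfl⟩ | ⟨rfl, rfl⟩ | ⟨rfl, rfl⟩ | ⟨rfl, rfl⟩ | ⟨rfl, rfl⟩ | ⟨rfl, rfl⟩ | ⟨rfl, rfl⟩ | ⟨rfl, rfl⟩ | ⟨rfl, rfl⟩ <;>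
        first | omega | exact h1.1 | exact h1.2
    have hb : pvBest lowL = 1 := by omega
    rw [hb]; rfl
  · have hle : pvBest lowL ≤ 2 := by
      rcases h3 with h | h
      · exact pvBest_le lowL _ 2 (by simp [pvPriority]) (by simp) h
      · exact pvBest_le lowL _ 2 (by simp [pvPriority]) (by simp) h
    have hge : 2 ≤ pvBest lowL := by
      refine pvBest_ge lowL 2 (by omega) ?_
      intro kw p hmem hlt
      simp only [pvPriority, List.mem_cons, List.not_mem_nil, or_false, Prod.mk.injEq] at hmem
      rcases hmem with ⟨rfl, rfl⟩ | ⟨rfl, rfl⟩ | ⟨rfl, rfl⟩ | ⟨rfl, rfl⟩ | ⟨rfl, rfl⟩ | ⟨rfl, rfl⟩ | ⟨rfl, rfl⟩ | ⟨rfl, rfl⟩ | ⟨rfl, rfl⟩ | ⟨rfl, rfl⟩ | ⟨rfl, rfl⟩ | ⟨rfl, rfl⟩ | ⟨rfl, rfl⟩ <;>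
        first | omega | exact h1.1 | exact h1.2 | exact h2
    have hb : pvBest lowL = 2 := by omega
    rw [hb]; rfl
  · have hle : pvBest lowL ≤ 3 := pvBest_le lowL _ 3 (by simp [pvPriority]) (by simp) h4
    have hge : 3 ≤ pvBest lowL := by
      refine pvBest_ge lowL 3 (by omega) ?_
      intro kw p hmem hlt
      simp only [pvPriority, List.mem_cons, List.not_mem_nil, or_false, Prod.mk.injEq] at hmem
      rcases hmem with ⟨rfl, rfl⟩ | ⟨rfl, rfl⟩ | ⟨rfl, rfl⟩ | ⟨rfl, rfl⟩ | ⟨rfl, rfl⟩ | ⟨rfl, rfl⟩ | ⟨rfl, rfl⟩ | ⟨rfl, rfl⟩ | ⟨rfl, rfl⟩ | ⟨rfl, rfl⟩ | ⟨rfl, rfl⟩ | ⟨rfl, rfl⟩ | ⟨rfl, rfl⟩ <;>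
        first | omega | exact h1.1 | exact h1.2 | exact h2 | exact h3.1 | exact h3.2
    have hb : pvBest lowL = 3 := by omega
    rw [hb]; rfl
  · have hle : pvBest lowL ≤ 4 := by
      rcases h5 with h | h | h | h
      · exact pvBest_le lowL _ 4 (by simp [pvPriority]) (by simp) h
      · exact pvBest_le lowL _ 4 (by simp [pvPriority]) (by simp) h
      · exact pvBest_le lowL _ 4 (by simp [pvPriority]) (by simp) h
      · exact pvBest_le lowL _ 4 (by simp [pvPriority]) (by simp) h
    have hge : 4 ≤ pvBest lowL := by
      refine pvBest_ge lowL 4 (by omega) ?_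
      intro kw p hmem hlt
      simp only [pvPriority, List.mem_cons, List.not_mem_nil, or_false, Prod.mk.injEq] at hmem
      rcases hmem with ⟨rfl, rfl⟩ | ⟨rfl, rfl⟩ | ⟨rfl, rfl⟩ | ⟨rfl, rfl⟩ | ⟨rfl, rfl⟩ | ⟨rfl, rfl⟩ | ⟨rfl, rfl⟩ | ⟨rfl, rfl⟩ | ⟨rfl, rfl⟩ | ⟨rfl, rfl⟩ | ⟨rfl, rfl⟩ | ⟨rfl, rfl⟩ | ⟨rfl, rfl⟩ <;>
        first | omega | exact h1.1 | exact h1.2 | exact h2 | exact h3.1 | exact h3.2 | exact h4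
    have hb : pvBest lowL = 4 := by omega
    rw [hb]; rfl
  · have hle : pvBest lowL ≤ 5 := by
      rcases h6 with h | h | h
      · exact pvBest_le lowL _ 5 (by simp [pvPriority]) (by simp) h
      · exact pvBest_le lowL _ 5 (by simp [pvPriority]) (by simp) h
      · exact pvBest_le lowL _ 5 (by simp [pvPriority]) (by simp) h
    have hge : 5 ≤ pvBest lowL := by
      refine pvBest_ge lowL 5 (by omega) ?_
      intro kw p hmem hlt
      simp only [pvPriority, List.mem_cons, List.not_mem_nil, or_false, Prod.mk.injEq] at hmem
      rcases hmem with ⟨rfl, rfl⟩ | ⟨rfl, rfl⟩ | ⟨rfl, rfl⟩ | ⟨rfl, rfl⟩ | ⟨rfl, rfl⟩ | ⟨rfl, rfl⟩ | ⟨rfl, rfl⟩ | ⟨rfl, rfl⟩ | ⟨rfl, rfl⟩ | ⟨rfl, rfl⟩ | ⟨rfl, rfl⟩ | ⟨rfl, rfl⟩ | ⟨rfl, rfl⟩ <;>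
        first | omega | exact h1.1 | exact h1.2 | exact h2 | exact h3.1 | exact h3.2 | exact h4 | exact h5.1 | exact h5.2.1 | exact h5.2.2.1 | exact h5.2.2.2
    have hb : pvBest lowL = 5 := by omega
    rw [hb]; rfl
  · have hb : pvBest lowL = 6 := by
      have hge : 6 ≤ pvBest lowL := by
        refine pvBest_ge lowL 6 (by omega) ?_
        intro kw p hmem hlt
        simp only [pvPriority, List.mem_cons, List.not_mem_nil, or_false, Prod.mk.injEq] at hmem
        rcases hmem with ⟨rfl, rfl⟩ | ⟨rfl, rfl⟩ | ⟨rfl, rfl⟩ | ⟨rfl, rfl⟩ | ⟨rfl, rfl⟩ | ⟨rfl, rfl⟩ | ⟨rfl, rfl⟩ | ⟨rfl, rfl⟩ | ⟨rfl, rfl⟩ | ⟨rfl, rfl⟩ | ⟨rfl, rfl⟩ | ⟨rfl, rfl⟩ | ⟨rfl, rfl⟩ <;>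
          first | exact h1.1 | exact h1.2 | exact h2 | exact h3.1 | exact h3.2 | exact h4 | exact h5.1 | exact h5.2.1 | exact h5.2.2.1 | exact h5.2.2.2 | exact h6.1 | exact h6.2.1 | exact h6.2.2
      have hle : pvBest lowL ≤ 6 :=
        pv_foldl_le _ (fun b i => pvScanPos_le lowL b i) _ 6
      omega
    rw [hb]; rfl

-- ===== VERDICT (by name: the statement is the Claim_ definition above) =====
theorem classify_trigger_spec : Claim_equal_classify_trigger := by
  intro file symbol template _
  unfold Spec_classify_trigger classify_trigger classify_trigger_alt
  simp only [List.any_cons, List.any_nil, Bool.or_false, PySem.Str.isIn_eq]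
  exact pv_main _
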